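-- pv_equiv track=rewrite | github.com/EngineerNV/MLProjects | Author Classification - naivebayLearning - NLP/dictionary.py | addOtherWords
-- ===== SOURCE A (Python) =====
-- def addOtherWords (hamilton, madison, jay):
-- 	# Add Hamilton words to Madison:
-- 	for gram in hamilton:
-- 		if gram not in madison:
-- 			madison[gram] = 0
-- 		if gram not in jay:
-- 			jay[gram] = 0
--
-- 	# Add Madision to Hamilton:
-- 	for gram in madison:
-- 		if gram not in hamilton:
-- 			hamilton[gram] = 0
-- 		if gram not in jay:
-- 			jay[gram] = 0
--
-- 	# Add Jay to Hamilton: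
-- 	for gram in jay:
-- 		if gram not in hamilton:
-- 			hamilton[gram] = 0
-- 		if gram not in madison:
-- 			madison[gram] = 0
-- 	return (hamilton,madison,jay)
-- ===== SOURCE B (Python) =====
-- def addOtherWords(hamilton, madison, jay):
--     # union of all keys, in first-occurrence order
--     allkeys = dict.fromkeys(k for d in (hamilton, madison, jay) for k in d)
--     # fill each dict with the keys it is missing, all at once
--     for d in (hamilton, madison, jay):
--         d.update({k: 0 for k in allkeys if k not in d})
--     return (hamilton, madison, jay)
-- ===== Notes on version B (the rewrite author's own statement) =====
-- stated objective: simpler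
-- what changed: Replaces A's three asymmetric patch-as-you-scan passes (each scanning one dict while patching the other two as they grow) with one union-of-keys computation and, per dict, a single bulk update with the comprehension of its missing keys.
import Mathlib
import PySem

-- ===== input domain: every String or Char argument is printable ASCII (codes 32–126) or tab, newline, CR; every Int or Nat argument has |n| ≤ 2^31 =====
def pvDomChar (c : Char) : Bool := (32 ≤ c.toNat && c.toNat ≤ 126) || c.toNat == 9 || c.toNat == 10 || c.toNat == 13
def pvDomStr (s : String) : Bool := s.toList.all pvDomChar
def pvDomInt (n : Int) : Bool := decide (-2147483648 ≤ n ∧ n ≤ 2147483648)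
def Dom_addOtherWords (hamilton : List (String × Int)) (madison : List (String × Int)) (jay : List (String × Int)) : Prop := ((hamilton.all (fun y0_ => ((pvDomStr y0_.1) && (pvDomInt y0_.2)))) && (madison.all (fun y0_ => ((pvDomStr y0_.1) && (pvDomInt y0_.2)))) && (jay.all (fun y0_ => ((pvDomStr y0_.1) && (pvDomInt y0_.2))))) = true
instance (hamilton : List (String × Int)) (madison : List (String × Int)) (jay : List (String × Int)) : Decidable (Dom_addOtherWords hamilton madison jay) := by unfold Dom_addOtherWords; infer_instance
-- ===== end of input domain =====

-- B replaces A's three asymmetric patch-as-you-scan passes with one key-union computation and,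
-- per dict, a single bulk append of the keys it is missing (simpler decomposition, same cost).
-- Both Pythons mutate the three dicts in place identically and return them; the theorems are
-- about the returned value.

-- ===== PORT A =====
-- `gram not in d` is key membership in the dict, `d[gram] = 0` on an absent key appends.
def pvHasKey (d : List (String × Int)) (k : String) : Bool := (d.map Prod.fst).contains k
def pvAdd0 (d : List (String × Int)) (k : String) : List (String × Int) :=
  if pvHasKey d k then d else d ++ [(k, 0)]

def addOtherWords (hamilton : List (String × Int)) (madison : List (String × Int)) (jay : List (String × Int)) : (List (String × Int)) × (List (String × Int)) × (List (String × Int)) :=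
  -- Add Hamilton words to Madison (and Jay):
  let mj := hamilton.foldl (fun p g => (pvAdd0 p.1 g.1, pvAdd0 p.2 g.1)) (madison, jay)
  -- Add Madison to Hamilton (and Jay):
  let hj := mj.1.foldl (fun p g => (pvAdd0 p.1 g.1, pvAdd0 p.2 g.1)) (hamilton, mj.2)
  -- Add Jay to Hamilton (and Madison):
  let hm := hj.2.foldl (fun p g => (pvAdd0 p.1 g.1, pvAdd0 p.2 g.1)) (hj.1, mj.1)
  (hm.1, hm.2, hj.2)

-- ===== PORT B =====
-- `d.update({k: 0 for k in allkeys if k not in d})`: the comprehension keeps the keys of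
-- allkeys missing from d (allkeys is duplicate-free, so no overwriting happens inside it),
-- and update appends each new key with value 0 in that order.
def pvBulkUpdate (allkeys : List String) (d : List (String × Int)) : List (String × Int) :=
  d ++ (allkeys.filter (fun k => !((d.map Prod.fst).contains k))).map (fun k => (k, (0 : Int)))

def addOtherWords_alt (hamilton : List (String × Int)) (madison : List (String × Int)) (jay : List (String × Int)) : (List (String × Int)) × (List (String × Int)) × (List (String × Int)) :=
  -- allkeys = dict.fromkeys(k for d in (hamilton, madison, jay) for k in d)
  let allkeys := PySem.List.dedup ((hamilton ++ madison ++ jay).map Prod.fst)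
  (pvBulkUpdate allkeys hamilton, pvBulkUpdate allkeys madison, pvBulkUpdate allkeys jay)

-- ===== PRECONDITION & SPEC =====
def Spec_addOtherWords (hamilton : List (String × Int)) (madison : List (String × Int)) (jay : List (String × Int)) (out : (List (String × Int)) × (List (String × Int)) × (List (String × Int))) : Prop := out = addOtherWords_alt hamilton madison jay
instance (hamilton : List (String × Int)) (madison : List (String × Int)) (jay : List (String × Int)) (out : (List (String × Int)) × (List (String × Int)) × (List (String × Int))) : Decidable (Spec_addOtherWords hamilton madison jay out) := by unfold Spec_addOtherWords; infer_instance

-- ===== CLAIM (what is proved, stated in full; the proofs are below) =====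
def Claim_equal_addOtherWords : Prop := ∀ (hamilton : List (String × Int)) (madison : List (String × Int)) (jay : List (String × Int)), Dom_addOtherWords hamilton madison jay → Spec_addOtherWords hamilton madison jay (addOtherWords hamilton madison jay)

-- ===== LEMMAS AND PROOFS =====

-- `sift seen ks`: the keys of ks not in `seen`, first occurrences only, in order.
def sift (seen : List String) : List String → List String
  | [] => []
  | k :: ks => if seen.contains k then sift seen ks else k :: sift (seen ++ [k]) ks

theorem mem_sift_iff (k : String) : ∀ (xs seen : List String), k ∈ sift seen xs ↔ k ∈ xs ∧ k ∉ seen := by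
  intro xs
  induction xs with
  | nil => intro seen; simp [sift]
  | cons a xs ih =>
    intro seen
    by_cases h : a ∈ seen
    · simp only [sift, List.contains_iff_mem, decide_eq_true_eq, h, if_true, ih,
        List.mem_cons]
      constructor
      · rintro ⟨h1, h2⟩; exact ⟨Or.inr h1, h2⟩
      · rintro ⟨h1 | h1, h2⟩
        · exact absurd (h1 ▸ h) h2
        · exact ⟨h1, h2⟩
    · simp only [sift, List.contains_iff_mem, decide_eq_true_eq, h, if_false, List.mem_cons,
        ih, List.mem_append, List.mem_singleton, List.not_mem_nil, or_false]
      constructor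
      · rintro (rfl | ⟨h1, h2⟩)
        · exact ⟨Or.inl rfl, h⟩
        · exact ⟨Or.inr h1, fun hs => h2 (Or.inl hs)⟩
      · rintro ⟨h1 | h1, h2⟩
        · exact Or.inl h1
        · by_cases hk : k = a
          · exact Or.inl hk
          · exact Or.inr ⟨h1, fun hs => hs.elim h2 hk⟩

theorem sift_eq_nil (seen xs : List String) (h : ∀ k ∈ xs, k ∈ seen) : sift seen xs = [] := by
  rw [List.eq_nil_iff_forall_not_mem]
  intro k hk
  rw [mem_sift_iff] at hk
  exact hk.2 (h k hk.1)

theorem sift_append (xs : List String) : ∀ (seen ys : List String),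
    sift seen (xs ++ ys) = sift seen xs ++ sift (seen ++ sift seen xs) ys := by
  induction xs with
  | nil => intro seen ys; simp [sift]
  | cons a xs ih =>
    intro seen ys
    by_cases h : a ∈ seen
    · simp [sift, List.contains_iff_mem, h, ih]
    · simp only [List.cons_append, sift, List.contains_iff_mem, decide_eq_true_eq, h,
        if_false, ih]
      simp [List.append_assoc]

theorem sift_absorb (seen xs ys zs : List String) (h : ∀ k ∈ ys, k ∈ seen ∨ k ∈ xs) :
    sift seen (xs ++ ys ++ zs) = sift seen (xs ++ zs) := by
  rw [List.append_assoc, sift_append, sift_append ys, sift_append]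
  have hnil : sift (seen ++ sift seen xs) ys = [] := by
    apply sift_eq_nil
    intro k hk
    rcases h k hk with h1 | h1
    · exact List.mem_append_left _ h1
    · by_cases hs : k ∈ seen
      · exact List.mem_append_left _ hs
      · exact List.mem_append_right _ ((mem_sift_iff k xs seen).mpr ⟨h1, hs⟩)
  rw [hnil]
  simp

theorem sift_of_sift (xs : List String) : ∀ (seen t : List String), (∀ k ∈ t, k ∈ seen) →
    sift seen (sift t xs) = sift seen xs := by
  induction xs with
  | nil => intro seen t _; simp [sift]
  | cons a xs ih =>
    intro seen t ht
    by_cases hat : a ∈ t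
    · simp only [sift, List.contains_iff_mem, decide_eq_true_eq, hat, if_true, ht a hat,
        ih _ _ ht]
    · by_cases has : a ∈ seen
      · simp only [sift, List.contains_iff_mem, decide_eq_true_eq, hat, if_false, has, if_true]
        apply ih
        intro k hk
        rcases List.mem_append.mp hk with h1 | h1
        · exact ht k h1
        · simp at h1; exact h1 ▸ has
      · simp only [sift, List.contains_iff_mem, decide_eq_true_eq, hat, if_false, has,
          if_true, List.cons.injEq, true_and]
        apply ih
        intro k hk
        rcases List.mem_append.mp hk with h1 | h1
        · exact List.mem_append_left _ (ht k h1)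
        · exact List.mem_append_right _ h1

theorem nodup_sift (xs : List String) : ∀ (seen : List String), (sift seen xs).Nodup := by
  induction xs with
  | nil => intro seen; simp [sift]
  | cons a xs ih =>
    intro seen
    by_cases h : a ∈ seen
    · simpa [sift, List.contains_iff_mem, h] using ih seen
    · simp only [sift, List.contains_iff_mem, decide_eq_true_eq, h, if_false, List.nodup_cons]
      refine ⟨fun hmem => ?_, ih _⟩
      have := (mem_sift_iff a xs (seen ++ [a])).mp hmem
      exact this.2 (List.mem_append_right _ (by simp))

theorem sift_nodup_eq_filter (xs : List String) : ∀ (seen : List String), xs.Nodup →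
    sift seen xs = xs.filter (fun k => !(seen.contains k)) := by
  induction xs with
  | nil => intro seen _; simp [sift]
  | cons a xs ih =>
    intro seen hnd
    rcases List.nodup_cons.mp hnd with ⟨ha, hxs⟩
    by_cases h : a ∈ seen
    · simp [sift, List.contains_iff_mem, h, List.filter, ih seen hxs]
    · rw [List.filter_cons_of_pos (by simp [List.contains_iff_mem, h])]
      simp only [sift]
      rw [if_neg (by simp [List.contains_iff_mem, h])]
      rw [ih (seen ++ [a]) hxs]
      apply congrArg
      apply List.filter_congr
      intro k hk
      have hka : k ≠ a := fun e => ha (e ▸ hk)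
      simp [List.contains_iff_mem, hka]

theorem foldl_add0_eq (ks : List String) : ∀ (d : List (String × Int)),
    ks.foldl pvAdd0 d = d ++ (sift (d.map Prod.fst) ks).map (fun k => (k, (0 : Int))) := by
  induction ks with
  | nil => intro d; simp [sift]
  | cons k ks ih =>
    intro d
    by_cases h : k ∈ d.map Prod.fst
    · simp [List.foldl, pvAdd0, pvHasKey, List.contains_iff_mem, h, sift, ih]
    · simp only [List.foldl, pvAdd0, pvHasKey, List.contains_iff_mem, decide_eq_true_eq, h,
        if_false, ih, sift]
      simp [List.append_assoc]

theorem foldl_pair (l : List (String × Int)) : ∀ (a b : List (String × Int)),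
    l.foldl (fun p g => (pvAdd0 p.1 g.1, pvAdd0 p.2 g.1)) (a, b)
      = ((l.map Prod.fst).foldl pvAdd0 a, (l.map Prod.fst).foldl pvAdd0 b) := by
  induction l with
  | nil => intro a b; simp
  | cons g l ih => intro a b; simp [List.foldl, ih]

theorem dedup_eq_sift (xs : List String) : PySem.List.dedup xs = sift [] xs := by
  have key : ∀ (xs s : List String), xs.foldl PySem.Set.add s = s ++ sift s xs := by
    intro xs
    induction xs with
    | nil => intro s; simp [sift]
    | cons a xs ih =>
      intro s
      by_cases h : a ∈ s
      · simp [List.foldl, PySem.Set.add, PySem.Set.contains, List.contains_iff_mem, h, sift, ih]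
      · simp only [List.foldl, PySem.Set.add, PySem.Set.contains, List.contains_iff_mem,
          decide_eq_true_eq, h, if_false, ih, sift]
        simp [List.append_assoc]
  simpa [PySem.List.dedup, PySem.Set.ofList, PySem.Set.empty] using key xs []

theorem keys_append (xs ys : List (String × Int)) :
    (xs ++ ys).map Prod.fst = xs.map Prod.fst ++ ys.map Prod.fst := List.map_append ..

theorem sift_absorb_mid (seen xs ys zs : List String) (h : ∀ k ∈ ys, k ∈ seen ∨ k ∈ xs) :
    sift seen (xs ++ (ys ++ zs)) = sift seen (xs ++ zs) := by
  rw [← List.append_assoc]; exact sift_absorb seen xs ys zs h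

theorem sift_absorb_right (seen xs ys : List String) (h : ∀ k ∈ ys, k ∈ seen ∨ k ∈ xs) :
    sift seen (xs ++ ys) = sift seen xs := by
  have := sift_absorb seen xs ys [] h
  simpa using this

theorem keysOf (x : List (String × Int)) (P : List String) :
    (P.foldl pvAdd0 x).map Prod.fst = x.map Prod.fst ++ sift (x.map Prod.fst) P := by
  rw [foldl_add0_eq]
  simp [List.map_map, Function.comp_def]

-- the bridge: A's tail over any key sequence that sifts like the full sequence equals B's
-- filter of the dedup of the full sequence
theorem sift_eq_bulk (kd all : List String) :
    sift kd all = (sift [] all).filter (fun k => !(kd.contains k)) := by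
  rw [← sift_of_sift all kd [] (by simp)]
  exact sift_nodup_eq_filter (sift [] all) kd (nodup_sift all [])

theorem foldl_eq_bulk (d : List (String × Int)) (P all : List String)
    (hP : sift (d.map Prod.fst) P = sift (d.map Prod.fst) all) :
    P.foldl pvAdd0 d = pvBulkUpdate (sift [] all) d := by
  rw [foldl_add0_eq, pvBulkUpdate, hP, sift_eq_bulk]

-- ===== VERDICT (by name: the statement is the Claim_ definition above) =====
theorem addOtherWords_spec : Claim_equal_addOtherWords := by
  intro h m j _
  unfold Spec_addOtherWords addOtherWords addOtherWords_alt
  simp only [foldl_pair, keys_append, dedup_eq_sift]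
  set kh := h.map Prod.fst with hkh
  set km := m.map Prod.fst with hkm
  set kj := j.map Prod.fst with hkj
  -- keys of the intermediate madison (after pass 1)
  rw [keysOf m kh]
  set P1 := km ++ sift km kh with hP1
  -- jay after passes 1 and 2 is one fold over kh ++ P1
  rw [← List.foldl_append (b := j) (l := kh) (l' := P1)]
  rw [keysOf j (kh ++ P1)]
  set T := sift kj (kh ++ P1) with hT
  -- hamilton and madison finals as single folds
  rw [← List.foldl_append (b := h) (l := P1) (l' := kj ++ T)]
  rw [← List.foldl_append (b := m) (l := kh) (l' := kj ++ T)]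
  -- membership helpers
  have hsub1 : ∀ k ∈ sift km kh, k ∈ kh := fun k hk => ((mem_sift_iff k kh km).mp hk).1
  have hsubT : ∀ k ∈ T, k ∈ kh ∨ k ∈ km := by
    intro k hk
    have := ((mem_sift_iff k (kh ++ P1) kj).mp hk).1
    rcases List.mem_append.mp this with h1 | h1
    · exact Or.inl h1
    · rcases List.mem_append.mp h1 with h2 | h2
      · exact Or.inr h2
      · exact Or.inl (hsub1 k h2)
  refine Prod.ext ?_ (Prod.ext ?_ ?_)
  · -- hamilton component
    apply foldl_eq_bulk h _ (kh ++ km ++ kj)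
    rw [← hkh]
    calc sift kh (P1 ++ (kj ++ T))
        = sift kh (km ++ (sift km kh ++ (kj ++ T))) := by rw [hP1, List.append_assoc]
      _ = sift kh (km ++ (kj ++ T)) := by
          exact sift_absorb_mid kh km (sift km kh) (kj ++ T) (fun k hk => Or.inl (hsub1 k hk))
      _ = sift kh ((km ++ kj) ++ T) := by rw [List.append_assoc]
      _ = sift kh (km ++ kj) := by
          apply sift_absorb_right
          intro k hk
          rcases hsubT k hk with h1 | h1
          · exact Or.inl h1
          · exact Or.inr (List.mem_append_left _ h1)
      _ = sift kh (kh ++ (km ++ kj)) := by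
          have := sift_absorb_mid kh [] kh (km ++ kj) (fun k hk => Or.inl hk)
          simpa using this.symm
      _ = sift kh (kh ++ km ++ kj) := by rw [List.append_assoc]
  · -- madison component
    apply foldl_eq_bulk m _ (kh ++ km ++ kj)
    rw [← hkm]
    calc sift km (kh ++ (kj ++ T))
        = sift km ((kh ++ kj) ++ T) := by rw [List.append_assoc]
      _ = sift km (kh ++ kj) := by
          apply sift_absorb_right
          intro k hk
          rcases hsubT k hk with h1 | h1
          · exact Or.inr (List.mem_append_left _ h1)
          · exact Or.inl h1
      _ = sift km (kh ++ (km ++ kj)) := by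
          exact (sift_absorb_mid km kh km kj (fun k hk => Or.inl hk)).symm
      _ = sift km (kh ++ km ++ kj) := by rw [List.append_assoc]
  · -- jay component
    apply foldl_eq_bulk j _ (kh ++ km ++ kj)
    rw [← hkj]
    calc sift kj (kh ++ P1)
        = sift kj (kh ++ (km ++ sift km kh)) := by rw [hP1]
      _ = sift kj ((kh ++ km) ++ sift km kh) := by rw [List.append_assoc]
      _ = sift kj (kh ++ km) := by
          apply sift_absorb_right
          intro k hk
          exact Or.inr (List.mem_append_left _ (hsub1 k hk))
      _ = sift kj ((kh ++ km) ++ kj) := by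
          exact (sift_absorb_right kj (kh ++ km) kj (fun k hk => Or.inl hk)).symm
      _ = sift kj (kh ++ km ++ kj) := rfl
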